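-- pv_equiv track=rewrite | github.com/pratikngupta/WTA | Week 2/pgupta85_session2_q2.py | check_cool_string
-- ===== SOURCE A (Python) =====
-- def check_cool_string(s):
--     # first we need to check if the string is empty or not
--     if len(s) == 0 or s[0] != 'a' or s[-1] != 'c':
--         return False
--
--     # creating a stack
--     stack = []
--
--     # using for loop to illiterate through every character in string "s"
--     for char in s:
--
--         # checking if current character is "c"
--         if char == 'c':
--
--             # If current character is c, then check if previous 2 character store in stack is a and b
--             if stack and stack[-2:] == ['a', 'b']:
--
--                 # If so, then pop them out of the stack, this is equal to removing abc from string as we are not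
--                 # adding c to the stack
--                 stack.pop()
--                 stack.pop()
--
--             # if not, then this string is not a cool string, stop the process and return false immediately
--             else:
--                 return False
--
--         # if current char is not "c", then we add them to stack to be compare with when we have "c".
--         else:
--             stack.append(char)
--
--     # if stack lenght is zero at the end, then string is cool, otherwise it would be false.
--     return len(stack) == 0
-- ===== SOURCE B (Python) =====
-- def check_cool_string(s):
--     # A non-empty string is "cool" iff it collapses to "" by repeatedly deleting "abc".
--     if s == "":
--         return False
--     while 'abc' in s:
--         s = s.replace('abc', '')
--     return s == ''
-- ===== Notes on version B (the rewrite author's own statement) =====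
-- stated objective: simpler
-- what changed: Replaces the one-pass stack simulation (with its s[0]/s[-1] guards and early returns) by repeated deletion of the substring 'abc' via str.replace until none remains, relying on confluence of the non-self-overlapping rewrite 'abc' -> ''; the empty string stays False.
import Mathlib
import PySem

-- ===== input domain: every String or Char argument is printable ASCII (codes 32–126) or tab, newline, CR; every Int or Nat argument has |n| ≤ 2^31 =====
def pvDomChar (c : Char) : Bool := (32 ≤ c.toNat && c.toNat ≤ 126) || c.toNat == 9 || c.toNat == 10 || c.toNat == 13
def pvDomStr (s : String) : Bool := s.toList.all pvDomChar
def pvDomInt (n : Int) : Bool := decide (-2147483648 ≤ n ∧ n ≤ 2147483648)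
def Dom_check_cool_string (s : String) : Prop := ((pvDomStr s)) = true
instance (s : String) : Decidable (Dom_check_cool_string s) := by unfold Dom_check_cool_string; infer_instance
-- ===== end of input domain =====

-- B replaces A's one-pass stack scan by a repeated-"abc"-deletion loop (str.replace); same return value, no mutation.


-- ===== PORT A =====
-- the 'for char in s' loop with its early 'return False'; stack kept Python-style (append at the end)
def loopA : List Char → List Char → Bool
  | [], stack => stack.length == 0
  | ch :: rest, stack =>
    if ch == 'c' then
      if !stack.isEmpty && (PySem.List.slice stack (some (-2)) none == ['a', 'b']) then
        -- stack.pop(); stack.pop() : drop the last element twice (the popped values are unused)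
        loopA rest stack.dropLast.dropLast
      else false
    else loopA rest (stack ++ [ch])

def check_cool_string (s : String) : Bool :=
  if PySem.Str.len s == 0 || !(PySem.Str.pyGet? s 0 == some 'a') || !(PySem.Str.pyGet? s (-1) == some 'c')
  then false
  else loopA s.toList []

-- ===== PORT B =====
-- the 'while "abc" in s: s = s.replace("abc", "")' loop; the fuel (initial length) only makes it
-- total: each iteration with "abc" present strictly shortens the list (altGo_noabc below)
def altGo : Nat → List Char → List Char
  | 0, l => l
  | fuel + 1, l =>
    if PySem.Chars.isIn ['a', 'b', 'c'] l then
      altGo fuel (PySem.Chars.replace l ['a', 'b', 'c'] [])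
    else l

def check_cool_string_alt (s : String) : Bool :=
  if s.toList.isEmpty then false
  else (altGo s.toList.length s.toList).isEmpty

-- ===== PRECONDITION & SPEC =====
def Spec_check_cool_string (s : String) (out : Bool) : Prop := out = check_cool_string_alt s
instance (s : String) (out : Bool) : Decidable (Spec_check_cool_string s out) := by unfold Spec_check_cool_string; infer_instance

-- ===== CLAIM (what is proved, stated in full; the proofs are below) =====
def Claim_equal_check_cool_string : Prop := ∀ (s : String), Dom_check_cool_string s → Spec_check_cool_string s (check_cool_string s)

-- ===== LEMMAS AND PROOFS =====

-- stack's top two elements are 'b','a' (stack stored top-first)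
def isBA : List Char → Bool
  | x :: y :: _ => x == 'b' && y == 'a'
  | _ => false

-- one step of the "abc"-cancelling normal-form automaton (stack top-first)
def nfStep (st : List Char) (ch : Char) : List Char :=
  if ch = 'c' then (if isBA st then st.tail.tail else ch :: st) else ch :: st

-- normal form of l w.r.t. deleting "abc", run with initial (reversed-prefix) stack st
def nfAux (st l : List Char) : List Char := l.foldl nfStep st

-- A's loop restated with the stack stored top-first
def goodR : List Char → List Char → Bool
  | [], st => st.isEmpty
  | ch :: rest, st =>
    if ch = 'c' then (if isBA st then goodR rest st.tail.tail else false)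
    else goodR rest (ch :: st)

-- proof-side model of s.replace('abc', ''): delete the non-overlapping occurrences left to right
def pvRepl : List Char → List Char
  | [] => []
  | c :: t =>
    if ['a', 'b', 'c'].isPrefixOf (c :: t) then pvRepl t.tail.tail else c :: pvRepl t
termination_by l => l.length
decreasing_by
  · simp [List.length_tail]; omega
  · simp

theorem prefix_abc_iff (l : List Char) :
    (['a', 'b', 'c'].isPrefixOf l) = true ↔ ∃ u, l = 'a' :: 'b' :: 'c' :: u := by
  rcases l with _ | ⟨x, _ | ⟨y, _ | ⟨z, u⟩⟩⟩ <;> simp [List.isPrefixOf]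
  constructor <;> intro h <;> exact ⟨h.1.symm, h.2.1.symm, h.2.2.symm⟩

theorem replace_go_eq : ∀ (fuel : Nat) (l acc : List Char), l.length ≤ fuel →
    PySem.Chars.replace.go ['a', 'b', 'c'] [] fuel l acc = acc.reverse ++ pvRepl l := by
  intro fuel
  induction fuel with
  | zero =>
    intro l acc h
    have hl : l = [] := by
      cases l with
      | nil => rfl
      | cons c t => simp at h
    subst hl
    simp [PySem.Chars.replace.go, pvRepl]
  | succ fuel ih =>
    intro l acc h
    cases l with
    | nil => simp [PySem.Chars.replace.go, pvRepl]
    | cons c t =>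
      rw [PySem.Chars.replace.go]
      by_cases hp : (['a', 'b', 'c'].isPrefixOf (c :: t)) = true
      · obtain ⟨u, hu⟩ := (prefix_abc_iff _).mp hp
        simp only [List.cons.injEq] at hu
        obtain ⟨rfl, rfl⟩ := hu
        rw [if_pos hp, pvRepl, if_pos hp]
        rw [ih _ _ (by simp at h ⊢; omega)]
        simp
      · rw [if_neg hp, pvRepl, if_neg hp]
        rw [ih t (c :: acc) (by simp at h; omega)]
        simp

theorem replace_abc_eq (l : List Char) :
    PySem.Chars.replace l ['a', 'b', 'c'] [] = pvRepl l := by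
  rw [PySem.Chars.replace]
  simp [replace_go_eq l.length l [] (le_refl _)]

theorem pvRepl_length_le (l : List Char) : (pvRepl l).length ≤ l.length := by
  induction l using pvRepl.induct with
  | case1 => simp [pvRepl]
  | case2 c t hp ih =>
    rw [pvRepl, if_pos hp]
    obtain ⟨u, hu⟩ := (prefix_abc_iff _).mp hp
    simp only [List.cons.injEq] at hu
    obtain ⟨rfl, rfl⟩ := hu
    simp at ih ⊢; omega
  | case3 c t hp ih =>
    rw [pvRepl, if_neg hp]
    simpa using Nat.succ_le_succ ih

theorem pvRepl_length_lt (l : List Char) (h : ['a', 'b', 'c'] <:+: l) :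
    (pvRepl l).length < l.length := by
  induction l using pvRepl.induct with
  | case1 => simp at h
  | case2 c t hp ih =>
    rw [pvRepl, if_pos hp]
    obtain ⟨u, hu⟩ := (prefix_abc_iff _).mp hp
    simp only [List.cons.injEq] at hu
    obtain ⟨rfl, rfl⟩ := hu
    have := pvRepl_length_le ('b' :: 'c' :: u).tail.tail
    simp at this ⊢; omega
  | case3 c t hp ih =>
    rw [pvRepl, if_neg hp]
    rcases List.infix_cons_iff.mp h with hpre | hinf
    · exact absurd (List.isPrefixOf_iff_prefix.mpr hpre) hp
    · simpa using Nat.succ_lt_succ (ih hinf)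

theorem nf_pvRepl (l : List Char) : ∀ st, nfAux st (pvRepl l) = nfAux st l := by
  induction l using pvRepl.induct with
  | case1 => intro st; rw [pvRepl]
  | case2 c t hp ih =>
    intro st
    rw [pvRepl, if_pos hp]
    obtain ⟨u, hu⟩ := (prefix_abc_iff _).mp hp
    simp only [List.cons.injEq] at hu
    obtain ⟨rfl, rfl⟩ := hu
    rw [ih]
    simp [nfAux, nfStep, isBA]
  | case3 c t hp ih =>
    intro st
    rw [pvRepl, if_neg hp]
    simp only [nfAux, List.foldl_cons]
    exact ih _

theorem loopA_eq_goodR : ∀ (l r : List Char), loopA l r.reverse = goodR l r := by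
  intro l
  induction l with
  | nil =>
    intro r
    cases r <;> simp [loopA, goodR]
  | cons ch rest ih =>
    intro r
    by_cases hc : ch = 'c'
    · subst hc
      rcases r with _ | ⟨x, _ | ⟨y, t⟩⟩
      · simp [loopA, goodR, isBA]
      · have hsl : PySem.List.slice [x] (some (-2)) none = [x] := by
          rw [PySem.List.slice_from_neg_ofNat _ 2 (by omega)]
          simp
        simp [loopA, goodR, hsl, isBA]
      · simp only [loopA, goodR]
        have hrev : (x :: y :: t).reverse = t.reverse ++ [y, x] := by simp
        have hsl : PySem.List.slice ((x :: y :: t).reverse) (some (-2)) none = [y, x] := by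
          rw [PySem.List.slice_from_neg_ofNat _ 2 (by omega)]
          rw [hrev]
          have hl2 : (t.reverse ++ [y, x]).length - 2 = t.reverse.length := by simp
          rw [hl2, List.drop_left]
        rw [hsl]
        by_cases hx : x = 'b' <;> by_cases hy : y = 'a'
        · subst hx; subst hy
          simp [isBA, ih t]
        all_goals simp [isBA, hx, hy]
    · simp only [loopA, goodR, if_neg (by simp [hc] : ¬ (ch == 'c') = true), if_neg hc]
      rw [← List.reverse_cons, ih]

theorem c_mem_nfAux : ∀ (l st : List Char), 'c' ∈ st → 'c' ∈ nfAux st l := by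
  intro l
  induction l with
  | nil => intro st h; exact h
  | cons ch rest ih =>
    intro st h
    simp only [nfAux, List.foldl_cons]
    apply ih
    unfold nfStep
    split
    · split
      · rename_i hba
        rcases st with _ | ⟨x, _ | ⟨y, t⟩⟩ <;> simp [isBA] at hba
        obtain ⟨rfl, rfl⟩ := hba
        simpa using h
      · exact List.mem_cons_of_mem _ h
    · exact List.mem_cons_of_mem _ h

theorem goodR_eq_nfAux : ∀ (l st : List Char), goodR l st = (nfAux st l).isEmpty := by
  intro l
  induction l with
  | nil => intro st; simp [goodR, nfAux]
  | cons ch rest ih =>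
    intro st
    by_cases hc : ch = 'c'
    · subst hc
      by_cases hba : isBA st = true
      · simp only [goodR, hba, nfAux, List.foldl_cons]
        rw [ih]
        simp [nfStep, hba, nfAux]
      · have hmem : 'c' ∈ nfAux (nfStep st 'c') rest := c_mem_nfAux _ _ (by simp [nfStep, hba])
        have hne : nfAux (nfStep st 'c') rest ≠ [] := by
          intro h0; rw [h0] at hmem; simp at hmem
        simp only [goodR, hba, nfAux, List.foldl_cons]
        simp only [nfAux] at hne
        simp [hne]
    · simp only [goodR, if_neg hc, nfAux, List.foldl_cons]
      rw [ih]
      simp [nfStep, hc, nfAux]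

theorem altGo_nf : ∀ (fuel : Nat) (l st : List Char), nfAux st (altGo fuel l) = nfAux st l := by
  intro fuel
  induction fuel with
  | zero => intro l st; rfl
  | succ fuel ih =>
    intro l st
    rw [altGo]
    by_cases hin : PySem.Chars.isIn ['a', 'b', 'c'] l = true
    · rw [if_pos hin, ih, replace_abc_eq, nf_pvRepl]
    · rw [if_neg hin]

theorem altGo_noabc : ∀ (fuel : Nat) (l : List Char), l.length ≤ fuel →
    PySem.Chars.isIn ['a', 'b', 'c'] (altGo fuel l) = false := by
  intro fuel
  induction fuel with
  | zero =>
    intro l h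
    have hl : l = [] := by
      cases l with
      | nil => rfl
      | cons c t => simp at h
    subst hl
    decide
  | succ fuel ih =>
    intro l h
    rw [altGo]
    by_cases hin : PySem.Chars.isIn ['a', 'b', 'c'] l = true
    · rw [if_pos hin]
      apply ih
      rw [replace_abc_eq]
      have := pvRepl_length_lt l ((PySem.Chars.isIn_iff_infix _ _).mp hin)
      omega
    · rw [if_neg hin]
      exact Bool.eq_false_iff.mpr hin

theorem nfAux_noabc : ∀ (l p : List Char),
    PySem.Chars.isIn ['a', 'b', 'c'] (p.reverse ++ l) = false → nfAux p l = l.reverse ++ p := by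
  intro l
  induction l with
  | nil => intro p _; simp [nfAux]
  | cons ch rest ih =>
    intro p h
    by_cases hc : ch = 'c'
    · subst hc
      by_cases hba : isBA p = true
      · exfalso
        rcases p with _ | ⟨x, _ | ⟨y, t⟩⟩ <;> simp [isBA] at hba
        obtain ⟨rfl, rfl⟩ := hba
        rw [PySem.Chars.isIn_eq_false_iff] at h
        apply h
        refine ⟨t.reverse, rest, ?_⟩
        simp
      · have hstep : nfStep p 'c' = 'c' :: p := by simp [nfStep, hba]
        simp only [nfAux, List.foldl_cons, hstep]
        have h' : PySem.Chars.isIn ['a', 'b', 'c'] (('c' :: p).reverse ++ rest) = false := by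
          simpa using h
        have := ih ('c' :: p) h'
        simp only [nfAux] at this
        rw [this]
        simp
    · have hstep : nfStep p ch = ch :: p := by simp [nfStep, hc]
      simp only [nfAux, List.foldl_cons, hstep]
      have h' : PySem.Chars.isIn ['a', 'b', 'c'] ((ch :: p).reverse ++ rest) = false := by
        simpa using h
      have := ih (ch :: p) h'
      simp only [nfAux] at this
      rw [this]
      simp

theorem nfAux_bottom : ∀ (l st : List Char) (y : Char), y ≠ 'a' →
    ∃ st', nfAux (st ++ [y]) l = st' ++ [y] := by
  intro l
  induction l with
  | nil => intro st y _; exact ⟨st, rfl⟩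
  | cons ch rest ih =>
    intro st y hy
    simp only [nfAux, List.foldl_cons]
    by_cases hc : ch = 'c'
    · subst hc
      rcases st with _ | ⟨x, _ | ⟨y2, t⟩⟩
      · have hstep : nfStep ([] ++ [y]) 'c' = ('c' :: []) ++ [y] := by
          simp [nfStep, isBA]
        rw [hstep]; exact ih _ y hy
      · have hstep : nfStep ([x] ++ [y]) 'c' = ('c' :: [x]) ++ [y] := by
          simp [nfStep, isBA, hy]
        rw [hstep]; exact ih _ y hy
      · by_cases hba : isBA (x :: y2 :: (t ++ [y])) = true
        · have hstep : nfStep ((x :: y2 :: t) ++ [y]) 'c' = t ++ [y] := by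
            simp only [List.cons_append]
            simp [nfStep, hba]
          rw [hstep]; exact ih _ y hy
        · have hstep : nfStep ((x :: y2 :: t) ++ [y]) 'c' = ('c' :: x :: y2 :: t) ++ [y] := by
            simp only [List.cons_append]
            simp [nfStep, hba]
          rw [hstep]; exact ih _ y hy
    · have hstep : nfStep (st ++ [y]) ch = (ch :: st) ++ [y] := by
        simp [nfStep, hc]
      rw [hstep]; exact ih _ y hy

theorem nfAux_head_ne_a (x : Char) (t : List Char) (hx : x ≠ 'a') :
    nfAux [] (x :: t) ≠ [] := by
  have hstep : nfStep [] x = [] ++ [x] := by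
    by_cases hc : x = 'c' <;> simp [nfStep, isBA, hc]
  simp only [nfAux, List.foldl_cons, hstep]
  obtain ⟨st', hst'⟩ := nfAux_bottom t [] x hx
  simp only [nfAux] at hst'
  rw [hst']
  simp

theorem nfAux_last_ne_c (m : List Char) (x : Char) (hx : x ≠ 'c') :
    nfAux [] (m ++ [x]) ≠ [] := by
  simp only [nfAux, List.foldl_append, List.foldl_cons, List.foldl_nil]
  simp [nfStep, hx]

theorem alt_eq_nf (s : String) (h : s.toList ≠ []) :
    check_cool_string_alt s = (nfAux [] s.toList).isEmpty := by
  unfold check_cool_string_alt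
  rw [if_neg (by simp [h])]
  have hfree := altGo_noabc s.toList.length s.toList (le_refl _)
  have hrev : nfAux [] (altGo s.toList.length s.toList) =
      (altGo s.toList.length s.toList).reverse ++ [] := by
    apply nfAux_noabc
    simpa using hfree
  have hnf := altGo_nf s.toList.length s.toList []
  rw [hrev] at hnf
  simp only [List.append_nil] at hnf
  rw [← hnf]
  simp

theorem pyGet_neg_one (l : List Char) (h : l ≠ []) :
    PySem.List.pyGet? l (-1) = l.getLast? := by
  have hl : 0 < l.length := List.length_pos_iff.mpr h
  unfold PySem.List.pyGet? PySem.List.pyIdx?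
  rw [if_neg (by omega), if_pos (by omega)]
  simp [List.getLast?_eq_getElem?]

-- ===== VERDICT (by name: the statement is the Claim_ definition above) =====
theorem check_cool_string_spec : Claim_equal_check_cool_string := by
  intro s _
  unfold Spec_check_cool_string check_cool_string
  cases hL : s.toList with
  | nil =>
    have hlen : (PySem.Str.len s == 0) = true := by
      rw [PySem.Str.len_eq, hL]; rfl
    simp only [hlen, Bool.true_or, if_true]
    unfold check_cool_string_alt
    rw [if_pos (by simp [hL])]
  | cons x t =>
    have hne : s.toList ≠ []:= by rw [hL]; simp
    have hsne : ¬ s = "" := by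
      intro h; subst h; simp at hL
    have hB := alt_eq_nf s hne
    rw [hL] at hB
    have hget0 : PySem.List.pyGet? s.toList 0 = some x := by
      simp [PySem.List.pyGet?, PySem.List.pyIdx?, hL]
    have hget1 : PySem.List.pyGet? s.toList (-1) = some ((x :: t).getLast (by simp)) := by
      rw [hL, pyGet_neg_one _ (by simp), List.getLast?_eq_some_getLast (by simp)]
    by_cases hx : x = 'a'
    · subst hx
      by_cases hc : ('a' :: t).getLast (by simp) = 'c'
      · -- all guards pass: both sides compute emptiness of the "abc" normal form
        rw [if_neg (by simp; exact ⟨⟨hsne, hget0⟩, by rw [hget1, hc]⟩)]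
        have hlp := loopA_eq_goodR ('a' :: t) []
        simp only [List.reverse_nil] at hlp
        rw [hlp, goodR_eq_nfAux, hB]
      · -- last char is not 'c': A fails its guard; B's normal form keeps that last char
        rw [if_pos (by simp; exact Or.inr (by simp [hget1, hc]))]
        have hnf : nfAux [] ('a' :: t) ≠ [] := by
          have hsplit := List.dropLast_append_getLast (l := 'a' :: t) (by simp)
          have hlast := nfAux_last_ne_c (('a' :: t).dropLast) (('a' :: t).getLast (by simp)) hc
          rw [hsplit] at hlast
          exact hlast
        rw [hB]
        simp [hnf]
    · -- first char is not 'a': A fails its guard; B's normal form keeps that bottom char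
      rw [if_pos (by simp; exact Or.inl (Or.inr (by simp [hget0, hx])))]
      rw [hB]
      have hnf := nfAux_head_ne_a x t hx
      simp [hnf]
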